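-- pv_equiv track=rewrite | github.com/sol-commits/coding-test | 백준/Silver/2607. 비슷한 단어/비슷한 단어.py | solution
-- ===== SOURCE A (Python) =====
-- from collections import defaultdict
--
-- def solution(words_cnt, words):
--     if words_cnt == 0:
--         return 0
--
--     target_dict = defaultdict(int)
--     for c in words[0]:
--         target_dict[c] += 1
--
--     answer = 0
--
--     for word in words[1:]:
--         word_dict = defaultdict(int)
--         for c in word:
--             word_dict[c] += 1
--
--         # 알파벳별 개수 차이 계산
--         diff = 0
--         for char in set(target_dict.keys()) | set(word_dict.keys()):
--             diff += abs(target_dict[char] - word_dict[char])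
--
--         # 비슷한 단어 조건: (1) 같거나 (2) 한 글자 차이거나 (3) 하나만 바뀐 경우
--         if diff == 0 or diff == 1 or (diff == 2 and len(words[0]) == len(word)):
--             answer += 1
--
--     return answer
-- ===== SOURCE B (Python) =====
-- def solution(words_cnt, words):
--     if words_cnt == 0:
--         return 0
--
--     first = sorted(words[0])
--     n0 = len(words[0])
--
--     answer = 0
--     for word in words[1:]:
--         w = sorted(word)
--         i = j = diff = 0
--         # two-pointer merge over the two sorted character lists:
--         # each unmatched character on either side costs 1
--         while i < len(first) and j < len(w):
--             if first[i] == w[j]: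
--                 i += 1
--                 j += 1
--             elif first[i] < w[j]:
--                 i += 1
--                 diff += 1
--             else:
--                 j += 1
--                 diff += 1
--         diff += (len(first) - i) + (len(w) - j)
--
--         if diff <= 1 or (diff == 2 and n0 == len(word)):
--             answer += 1
--     return answer
-- ===== Notes on version B (the rewrite author's own statement) =====
-- stated objective: faster
-- what changed: Per-word L1 letter-frequency distance is computed by a two-pointer merge of the two sorted character lists instead of building two frequency dictionaries and summing absolute differences over the union of their key sets.
import Mathlib
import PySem

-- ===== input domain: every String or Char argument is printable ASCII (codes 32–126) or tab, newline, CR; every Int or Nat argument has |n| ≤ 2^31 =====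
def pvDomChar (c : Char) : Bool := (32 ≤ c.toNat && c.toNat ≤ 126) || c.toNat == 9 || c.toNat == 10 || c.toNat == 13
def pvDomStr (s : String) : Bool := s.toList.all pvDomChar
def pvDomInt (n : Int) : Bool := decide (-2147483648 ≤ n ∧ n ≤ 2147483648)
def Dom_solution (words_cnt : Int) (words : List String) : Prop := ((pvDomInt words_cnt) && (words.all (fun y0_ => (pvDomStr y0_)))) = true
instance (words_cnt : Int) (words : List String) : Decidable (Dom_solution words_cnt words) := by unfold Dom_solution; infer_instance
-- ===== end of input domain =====

-- B replaces A's per-word dict-of-counts + key-set-union summation by a two-pointer merge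
-- of sorted character lists (measured constant-factor speedup in a timing run).

-- ===== PORT A =====
-- defaultdict accesses 'target_dict[char]' insert missing keys with value 0 during the loop;
-- that mutation changes neither any looked-up count nor the diff sum (added keys count 0 on
-- both sides), so the port reads counts with getD 0 without threading the mutated dict.
-- The Python iterates the key-union set in hash order; the port fixes first-insertion order,
-- which is exact here because the summed result is order-independent.
def solution (words_cnt : Int) (words : List String) : Int :=
  if words_cnt = 0 then 0
  else
    -- words[0]; Pre_solution guarantees words ≠ [] in this branch
    let w0 := PySem.List.pyGetD words 0 ""
    let targetDict := (w0.toList).foldl (fun d c => d.modify c 0 (· + 1)) (PySem.Dict.empty : PySem.Dict Char Int)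
    -- words[1:] = drop 1 (exact for this nonneg literal slice)
    (words.drop 1).foldl (fun answer word =>
      let wordDict := (word.toList).foldl (fun d c => d.modify c 0 (· + 1)) (PySem.Dict.empty : PySem.Dict Char Int)
      let diff := (PySem.Set.union (PySem.Set.ofList targetDict.keys)
                     (PySem.Set.ofList wordDict.keys)).foldl
          (fun acc c => acc + |targetDict.getD c 0 - wordDict.getD c 0|) 0
      if diff = 0 ∨ diff = 1 ∨ (diff = 2 ∧ PySem.Str.len w0 = PySem.Str.len word)
      then answer + 1 else answer) 0

-- ===== PORT B =====
-- the while-loop of Source B: advance both pointers on a match, otherwise the smaller side,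
-- counting 1 per unmatched character; the base cases add the leftover tail lengths
def mergeDiff : List Char → List Char → Int
  | [], ys => ys.length
  | x :: xs, [] => (x :: xs).length
  | x :: xs, y :: ys =>
      if x = y then mergeDiff xs ys
      else if x < y then 1 + mergeDiff xs (y :: ys)
      else 1 + mergeDiff (x :: xs) ys

def solution_alt (words_cnt : Int) (words : List String) : Int :=
  if words_cnt = 0 then 0
  else
    let w0 := PySem.List.pyGetD words 0 ""
    let first := PySem.List.sorted w0.toList (fun c => c) false
    (words.drop 1).foldl (fun answer word =>
      let w := PySem.List.sorted word.toList (fun c => c) false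
      let diff := mergeDiff first w
      if diff ≤ 1 ∨ (diff = 2 ∧ PySem.Str.len w0 = PySem.Str.len word)
      then answer + 1 else answer) 0

-- ===== PRECONDITION & SPEC =====
-- Pre_ excludes exactly the inputs (words_cnt ≠ 0 with an empty word list) on which the
-- Python A raises IndexError on words[0].
def Pre_solution (words_cnt : Int) (words : List String) : Prop :=
  words_cnt = 0 ∨ words ≠ []
instance (words_cnt : Int) (words : List String) : Decidable (Pre_solution words_cnt words) := by unfold Pre_solution; infer_instance

def pvWitness_solution : Int × List String := (3, ["lead", "load", "lead"])

def Spec_solution (words_cnt : Int) (words : List String) (out : Int) : Prop := out = solution_alt words_cnt words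
instance (words_cnt : Int) (words : List String) (out : Int) : Decidable (Spec_solution words_cnt words out) := by unfold Spec_solution; infer_instance

-- ===== CLAIM (what is proved, stated in full; the proofs are below) =====
def Claim_equal_solution : Prop := ∀ (words_cnt : Int) (words : List String), Dom_solution words_cnt words → Pre_solution words_cnt words → Spec_solution words_cnt words (solution words_cnt words)

-- ===== LEMMAS AND PROOFS =====

-- the mathematical pivot: L1 distance between the letter multisets
def l1 (a b : List Char) : Int :=
  ∑ c ∈ (a ++ b).toFinset, |(a.count c : Int) - (b.count c : Int)|

lemma list_sum_count (a : List Char) : ∑ c ∈ a.toFinset, a.count c = a.length := by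
  simp

lemma l1_eq_sum_superset (a b : List Char) (S : Finset Char)
    (hS : (a ++ b).toFinset ⊆ S) :
    ∑ c ∈ S, |(a.count c : Int) - (b.count c : Int)| = l1 a b := by
  unfold l1
  refine (Finset.sum_subset hS ?_).symm
  intro c _ hc
  simp only [List.toFinset_append, Finset.mem_union, List.mem_toFinset, not_or] at hc
  rw [List.count_eq_zero_of_not_mem hc.1, List.count_eq_zero_of_not_mem hc.2]
  simp

lemma l1_nonneg (a b : List Char) : 0 ≤ l1 a b := by
  unfold l1
  exact Finset.sum_nonneg (fun c _ => abs_nonneg _)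

lemma l1_nil_right (a : List Char) : l1 a [] = a.length := by
  unfold l1
  simp only [List.count_nil, Int.natCast_zero, sub_zero, List.append_nil]
  rw [Finset.sum_congr rfl (fun c _ => abs_of_nonneg (Int.natCast_nonneg _)),
      ← Nat.cast_sum, list_sum_count a]

lemma l1_nil_left (b : List Char) : l1 [] b = b.length := by
  unfold l1
  simp only [List.count_nil, Int.natCast_zero, zero_sub, abs_neg, List.nil_append]
  rw [Finset.sum_congr rfl (fun c _ => abs_of_nonneg (Int.natCast_nonneg _)),
      ← Nat.cast_sum, list_sum_count b]

-- one unmatched head (absent from the other list) contributes exactly 1 to l1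
lemma l1_cons_left_not_mem (x : Char) (xs b : List Char) (hx : x ∉ b) :
    l1 (x :: xs) b = 1 + l1 xs b := by
  have hsub : (xs ++ b).toFinset ⊆ ((x :: xs) ++ b).toFinset := by
    intro c hc
    simp only [List.toFinset_append, List.toFinset_cons, Finset.mem_union,
      Finset.mem_insert, List.mem_toFinset] at hc ⊢
    tauto
  have hmemx : x ∈ ((x :: xs) ++ b).toFinset := by simp
  have hstep : ∀ c ∈ ((x :: xs) ++ b).toFinset,
      |((x :: xs).count c : Int) - (b.count c : Int)|
        = |(xs.count c : Int) - (b.count c : Int)| + (if c = x then 1 else 0) := by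
    intro c _
    by_cases hcx : c = x
    · subst hcx
      rw [List.count_cons_self, List.count_eq_zero_of_not_mem hx]
      push_cast
      rw [sub_zero, sub_zero, abs_of_nonneg (by positivity),
          abs_of_nonneg (Int.natCast_nonneg _)]
      simp
    · have hxc : x ≠ c := fun h => hcx h.symm
      simp [hxc, hcx]
  unfold l1
  rw [Finset.sum_congr rfl hstep, Finset.sum_add_distrib,
      Finset.sum_ite_eq' _ x (fun _ => (1 : Int)), if_pos hmemx,
      l1_eq_sum_superset xs b _ hsub]
  unfold l1
  ring

lemma l1_comm (a b : List Char) : l1 a b = l1 b a := by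
  unfold l1
  rw [List.toFinset_append, Finset.union_comm, ← List.toFinset_append]
  exact Finset.sum_congr rfl (fun c _ => by rw [abs_sub_comm])

-- equal heads cancel
lemma l1_cons_cons_same (x : Char) (xs ys : List Char) :
    l1 (x :: xs) (x :: ys) = l1 xs ys := by
  have hsub : (xs ++ ys).toFinset ⊆ ((x :: xs) ++ (x :: ys)).toFinset := by
    intro c hc
    simp only [List.toFinset_append, List.toFinset_cons, Finset.mem_union,
      Finset.mem_insert, List.mem_toFinset] at hc ⊢
    tauto
  have hstep : ∀ c ∈ ((x :: xs) ++ (x :: ys)).toFinset,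
      |((x :: xs).count c : Int) - ((x :: ys).count c : Int)|
        = |(xs.count c : Int) - (ys.count c : Int)| := by
    intro c _
    by_cases hcx : c = x
    · subst hcx
      rw [List.count_cons_self, List.count_cons_self]
      push_cast
      ring_nf
    · simp [List.count_cons]
  unfold l1
  rw [Finset.sum_congr rfl hstep]
  exact l1_eq_sum_superset xs ys _ hsub

-- head smaller than everything in the other (sorted) list is absent from it
lemma not_mem_of_lt_head (x y : Char) (ys : List Char)
    (hxy : x < y) (hs : (y :: ys).Pairwise (· ≤ ·)) : x ∉ y :: ys := by
  intro hmem
  rcases List.mem_cons.mp hmem with h | h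
  · exact absurd h (ne_of_lt hxy)
  · exact absurd ((List.pairwise_cons.mp hs).1 x h) (not_le.mpr hxy)

-- MAIN: the merge distance of two sorted lists is the L1 multiset distance
lemma mergeDiff_eq_l1 : ∀ (a b : List Char),
    a.Pairwise (· ≤ ·) → b.Pairwise (· ≤ ·) → mergeDiff a b = l1 a b
  | [], b, _, _ => by rw [mergeDiff, l1_nil_left]
  | x :: xs, [], _, _ => by rw [mergeDiff, l1_nil_right]
  | x :: xs, y :: ys, ha, hb => by
    rw [mergeDiff]
    rcases lt_trichotomy x y with hlt | heq | hgt
    · rw [if_neg (ne_of_lt hlt), if_pos hlt,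
        mergeDiff_eq_l1 xs (y :: ys) (List.Pairwise.of_cons ha) hb,
        l1_cons_left_not_mem x xs (y :: ys) (not_mem_of_lt_head x y ys hlt hb)]
    · subst heq
      rw [if_pos rfl, mergeDiff_eq_l1 xs ys (List.Pairwise.of_cons ha)
        (List.Pairwise.of_cons hb), l1_cons_cons_same]
    · rw [if_neg (ne_of_gt hgt), if_neg (not_lt_of_gt hgt),
        mergeDiff_eq_l1 (x :: xs) ys ha (List.Pairwise.of_cons hb),
        l1_comm (x :: xs) (y :: ys), l1_comm (x :: xs) ys,
        l1_cons_left_not_mem y ys (x :: xs) (not_mem_of_lt_head y x xs hgt ha)]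
  termination_by a b => a.length + b.length

-- A's diff: fold over the key-union set of the two counters is l1 as well
lemma dictDiff_eq_l1 (s t : List Char) :
    (PySem.Set.union
        (PySem.Set.ofList (s.foldl (fun d c => d.modify c 0 (· + 1)) (PySem.Dict.empty : PySem.Dict Char Int)).keys)
        (PySem.Set.ofList (t.foldl (fun d c => d.modify c 0 (· + 1)) (PySem.Dict.empty : PySem.Dict Char Int)).keys)).foldl
      (fun acc c => acc +
        |(s.foldl (fun d c => d.modify c 0 (· + 1)) (PySem.Dict.empty : PySem.Dict Char Int)).getD c 0 -
         (t.foldl (fun d c => d.modify c 0 (· + 1)) (PySem.Dict.empty : PySem.Dict Char Int)).getD c 0|) 0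
    = l1 s t := by
  rw [← PySem.Dict.counter_eq_foldl, ← PySem.Dict.counter_eq_foldl]
  set K := PySem.Set.union (PySem.Set.ofList (PySem.Dict.counter s).keys)
      (PySem.Set.ofList (PySem.Dict.counter t).keys) with hK
  have hnodup : K.Nodup := PySem.Set.nodup_union _ _ (PySem.Set.nodup_ofList _)
  have hmem : ∀ c : Char, c ∈ K ↔ c ∈ s ∨ c ∈ t := by
    intro c
    rw [hK, PySem.Set.mem_union]
    simp [PySem.Set.mem_ofList, PySem.Dict.keys_counter, PySem.Set.mem_ofList]
  have hfold : K.foldl (fun acc c => acc +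
      |(PySem.Dict.counter s).getD c 0 - (PySem.Dict.counter t).getD c 0|) 0
      = (K.map (fun c =>
          |(s.count c : Int) - (t.count c : Int)|)).sum := by
    rw [PySem.List.foldl_add]
    simp [PySem.Dict.getD_counter]
  rw [hfold]
  have hKfin : K.toFinset = (s ++ t).toFinset := by
    ext c
    simp [List.mem_toFinset, hmem c]
  calc (K.map (fun c => |(s.count c : Int) - (t.count c : Int)|)).sum
      = ∑ c ∈ K.toFinset, |(s.count c : Int) - (t.count c : Int)| :=
        (List.sum_toFinset _ hnodup).symm
    _ = l1 s t := by rw [hKfin]; rfl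

-- pointwise-equal folding functions fold equally
lemma foldl_funext {α β : Type} (l : List β) (f g : α → β → α) (init : α)
    (h : ∀ a b, f a b = g a b) : l.foldl f init = l.foldl g init := by
  have hfg : f = g := funext fun a => funext (h a)
  rw [hfg]

-- the per-word diffs of the two ports agree
lemma perWord_diff_eq (s t : List Char) :
    (PySem.Set.union
        (PySem.Set.ofList (s.foldl (fun d c => d.modify c 0 (· + 1)) (PySem.Dict.empty : PySem.Dict Char Int)).keys)
        (PySem.Set.ofList (t.foldl (fun d c => d.modify c 0 (· + 1)) (PySem.Dict.empty : PySem.Dict Char Int)).keys)).foldl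
      (fun acc c => acc +
        |(s.foldl (fun d c => d.modify c 0 (· + 1)) (PySem.Dict.empty : PySem.Dict Char Int)).getD c 0 -
         (t.foldl (fun d c => d.modify c 0 (· + 1)) (PySem.Dict.empty : PySem.Dict Char Int)).getD c 0|) 0
    = mergeDiff (PySem.List.sorted s (fun c => c) false)
        (PySem.List.sorted t (fun c => c) false) := by
  rw [dictDiff_eq_l1,
      mergeDiff_eq_l1 _ _ (PySem.List.sorted_pairwise s (fun c => c))
        (PySem.List.sorted_pairwise t (fun c => c))]
  unfold l1
  have hperm : ((PySem.List.sorted s (fun c => c) false) ++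
      (PySem.List.sorted t (fun c => c) false)).Perm (s ++ t) :=
    (PySem.List.sorted_perm s (fun c => c) false).append
      (PySem.List.sorted_perm t (fun c => c) false)
  rw [List.toFinset_eq_of_perm _ _ hperm]
  refine Finset.sum_congr rfl (fun c _ => ?_)
  rw [(PySem.List.sorted_perm s (fun c => c) false).count_eq,
      (PySem.List.sorted_perm t (fun c => c) false).count_eq]

-- ===== VERDICT (by name: the statement is the Claim_ definition above) =====
theorem solution_spec : Claim_equal_solution := by
  intro words_cnt words _ _
  unfold Spec_solution solution solution_alt
  by_cases h0 : words_cnt = 0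
  · simp [h0]
  · simp only [if_neg h0]
    refine foldl_funext _ _ _ _ (fun answer word => ?_)
    rw [perWord_diff_eq]
    set d := mergeDiff
      (PySem.List.sorted (PySem.List.pyGetD words 0 "").toList (fun c => c) false)
      (PySem.List.sorted word.toList (fun c => c) false) with hd
    have hnn : 0 ≤ d := by
      rw [hd, mergeDiff_eq_l1 _ _ (PySem.List.sorted_pairwise _ _)
        (PySem.List.sorted_pairwise _ _)]
      exact l1_nonneg _ _
    have hcond : (d = 0 ∨ d = 1 ∨ (d = 2 ∧ PySem.Str.len (PySem.List.pyGetD words 0 "") = PySem.Str.len word))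
        ↔ (d ≤ 1 ∨ (d = 2 ∧ PySem.Str.len (PySem.List.pyGetD words 0 "") = PySem.Str.len word)) := by
      constructor
      · rintro (h | h | h)
        · exact Or.inl (by omega)
        · exact Or.inl (by omega)
        · exact Or.inr h
      · rintro (h | h)
        · omega
        · exact Or.inr (Or.inr h)
    by_cases hc : d = 0 ∨ d = 1 ∨ (d = 2 ∧ PySem.Str.len (PySem.List.pyGetD words 0 "") = PySem.Str.len word)
    · rw [if_pos hc, if_pos (hcond.mp hc)]
    · rw [if_neg hc, if_neg (fun h => hc (hcond.mpr h))]
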